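-- pv_equiv track=rewrite | github.com/Draagon/draagon-ai | tests/integration/agents/benchmark_semantic_expansion_integration.py | _extract_expanded_query
-- ===== SOURCE A (Python) =====
-- def _extract_expanded_query(content: str, fallback: str) -> str:
--     """Extract expanded query from LLM response."""
--     for line in content.split("\n"):
--         if "EXPANDED_QUERY:" in line:
--             return line.split("EXPANDED_QUERY:", 1)[1].strip()
--     # Fall back to first non-empty line that looks like a query
--     for line in content.split("\n"):
--         line = line.strip()
--         if line and not line.startswith(("ENTITIES", "TERMS", "1.", "2.", "3.")):
--             return line
--     return fallback
-- ===== SOURCE B (Python) =====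
-- def _extract_expanded_query(content: str, fallback: str) -> str:
--     """Extract expanded query from LLM response (single pass)."""
--     candidate = None
--     for line in content.split("\n"):
--         if "EXPANDED_QUERY:" in line:
--             return line.split("EXPANDED_QUERY:", 1)[1].strip()
--         if candidate is None:
--             stripped = line.strip()
--             if stripped and not stripped.startswith(("ENTITIES", "TERMS", "1.", "2.", "3.")):
--                 candidate = stripped
--     return candidate if candidate is not None else fallback
-- ===== Notes on version B (the rewrite author's own statement) =====
-- stated objective: alternative
-- what changed: A's two separate scans over the split lines (marker scan, then fallback scan) are fused into one pass that carries a fallback candidate and still gives the marker global priority.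
import Mathlib
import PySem

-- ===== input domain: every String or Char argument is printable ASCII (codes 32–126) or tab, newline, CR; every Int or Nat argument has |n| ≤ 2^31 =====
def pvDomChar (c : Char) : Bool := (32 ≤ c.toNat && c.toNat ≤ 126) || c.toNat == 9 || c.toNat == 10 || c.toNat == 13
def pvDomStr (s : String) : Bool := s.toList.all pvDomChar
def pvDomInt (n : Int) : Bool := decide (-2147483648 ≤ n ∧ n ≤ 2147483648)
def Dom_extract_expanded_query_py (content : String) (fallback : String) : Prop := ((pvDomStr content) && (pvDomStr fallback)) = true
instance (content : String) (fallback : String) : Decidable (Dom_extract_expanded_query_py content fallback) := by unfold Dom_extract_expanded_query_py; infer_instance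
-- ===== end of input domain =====

-- B fuses A's two scans of the lines into one pass carrying a fallback candidate (objective: alternative single-pass decomposition).

-- ===== PORT A =====
-- shared by both ports: 'content.split("\n")' (split? is none only for an empty separator)
def pvLines (content : String) : List String := (PySem.Str.split? content "\n").getD []

-- shared by both ports: the prefix test 'stripped.startswith(("ENTITIES","TERMS","1.","2.","3."))'
def pvBadPrefix (s : String) : Bool :=
  PySem.Str.startswith s "ENTITIES" || PySem.Str.startswith s "TERMS" ||
  PySem.Str.startswith s "1." || PySem.Str.startswith s "2." || PySem.Str.startswith s "3."

-- shared by both ports: 'line.split("EXPANDED_QUERY:", 1)[1].strip()' (the [1] exists whenever the marker is in the line)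
def pvExpVal (line : String) : String :=
  PySem.Str.strip (PySem.List.pyGetD ((PySem.Str.splitMax? line "EXPANDED_QUERY:" 1).getD []) 1 "")

-- A's first loop: scan for a line containing "EXPANDED_QUERY:"
def pvALoop1 : List String → Option String
  | [] => none
  | l :: ls => if PySem.Str.isIn "EXPANDED_QUERY:" l then some (pvExpVal l) else pvALoop1 ls

-- A's second loop: first stripped line that is non-empty and has no excluded prefix
def pvALoop2 : List String → Option String
  | [] => none
  | l :: ls =>
      let s := PySem.Str.strip l
      if s != "" && !pvBadPrefix s then some s else pvALoop2 ls

def extract_expanded_query_py (content : String) (fallback : String) : String :=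
  match pvALoop1 (pvLines content) with
  | some r => r
  | none =>
    match pvALoop2 (pvLines content) with
    | some r => r
    | none => fallback

-- ===== PORT B =====
-- B's single loop: return at the marker, otherwise record the first admissible stripped line as candidate
def pvBLoop (fallback : String) : List String → Option String → String
  | [], cand => cand.getD fallback
  | l :: ls, cand =>
      if PySem.Str.isIn "EXPANDED_QUERY:" l then pvExpVal l
      else
        match cand with
        | some _ => pvBLoop fallback ls cand
        | none =>
          let s := PySem.Str.strip l
          if s != "" && !pvBadPrefix s then pvBLoop fallback ls (some s)
          else pvBLoop fallback ls none

def extract_expanded_query_py_alt (content : String) (fallback : String) : String :=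
  pvBLoop fallback (pvLines content) none

-- ===== PRECONDITION & SPEC =====
def Spec_extract_expanded_query_py (content : String) (fallback : String) (out : String) : Prop := out = extract_expanded_query_py_alt content fallback
instance (content : String) (fallback : String) (out : String) : Decidable (Spec_extract_expanded_query_py content fallback out) := by unfold Spec_extract_expanded_query_py; infer_instance

-- ===== CLAIM (what is proved, stated in full; the proofs are below) =====
def Claim_equal_extract_expanded_query_py : Prop := ∀ (content : String) (fallback : String), Dom_extract_expanded_query_py content fallback → Spec_extract_expanded_query_py content fallback (extract_expanded_query_py content fallback)

-- ===== LEMMAS AND PROOFS =====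
theorem pvBLoop_some (fb c : String) : ∀ ls : List String, pvBLoop fb ls (some c) = (pvALoop1 ls).getD c := by
  intro ls
  induction ls with
  | nil => rfl
  | cons l ls ih =>
    simp only [pvBLoop, pvALoop1]
    cases h : PySem.Str.isIn "EXPANDED_QUERY:" l <;> simp [ih]

theorem pvBLoop_none (fb : String) : ∀ ls : List String,
    pvBLoop fb ls none = (pvALoop1 ls).getD ((pvALoop2 ls).getD fb) := by
  intro ls
  induction ls with
  | nil => rfl
  | cons l ls ih =>
    simp only [pvBLoop, pvALoop1, pvALoop2]
    cases h : PySem.Str.isIn "EXPANDED_QUERY:" l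
    · cases h2 : (PySem.Str.strip l != "" && !pvBadPrefix (PySem.Str.strip l))
      · simp [ih]
      · simp [pvBLoop_some]
    · simp [h]

-- ===== VERDICT (by name: the statement is the Claim_ definition above) =====
theorem extract_expanded_query_py_spec : Claim_equal_extract_expanded_query_py := by
  intro content fallback _
  unfold Spec_extract_expanded_query_py extract_expanded_query_py extract_expanded_query_py_alt
  rw [pvBLoop_none]
  cases pvALoop1 (pvLines content) <;>
    cases pvALoop2 (pvLines content) <;> rfl
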